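-- pv_equiv track=rewrite | github.com/dpsrawaljnv/mcq-test-application | backend/app/utils.py | validate_media_url
-- ===== SOURCE A (Python) =====
-- def validate_media_url(url: str, media_type: str) -> bool:
--     """Validate media URL based on type."""
--     allowed_image_extensions = ['.jpg', '.jpeg', '.png', '.gif']
--     allowed_video_extensions = ['.mp4', '.webm']
--     allowed_audio_extensions = ['.mp3', '.wav']
--
--     url_lower = url.lower()
--
--     if media_type == 'image':
--         return any(url_lower.endswith(ext) for ext in allowed_image_extensions)
--     elif media_type == 'video':
--         return any(url_lower.endswith(ext) for ext in allowed_video_extensions)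
--     elif media_type == 'audio':
--         return any(url_lower.endswith(ext) for ext in allowed_audio_extensions)
--
--     return False
-- ===== SOURCE B (Python) =====
-- _ALLOWED = {
--     'image': frozenset(('jpg', 'jpeg', 'png', 'gif')),
--     'video': frozenset(('mp4', 'webm')),
--     'audio': frozenset(('mp3', 'wav')),
-- }
--
-- def validate_media_url(url: str, media_type: str) -> bool:
--     """Validate media URL based on type."""
--     _, sep, ext = url.lower().rpartition('.')
--     return sep != '' and ext in _ALLOWED.get(media_type, frozenset())
-- ===== Notes on version B (the rewrite author's own statement) =====
-- stated objective: idiomatic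
-- what changed: Instead of testing the URL against each allowed suffix (if/elif chain of any()-endswith loops), B parses the URL once: it extracts the part after the last dot with rpartition and checks that extension for membership in a per-type frozenset; correct because endswith('.ext') for a dot-free ext is exactly 'a dot exists and the segment after the last dot equals ext'.
import Mathlib
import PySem

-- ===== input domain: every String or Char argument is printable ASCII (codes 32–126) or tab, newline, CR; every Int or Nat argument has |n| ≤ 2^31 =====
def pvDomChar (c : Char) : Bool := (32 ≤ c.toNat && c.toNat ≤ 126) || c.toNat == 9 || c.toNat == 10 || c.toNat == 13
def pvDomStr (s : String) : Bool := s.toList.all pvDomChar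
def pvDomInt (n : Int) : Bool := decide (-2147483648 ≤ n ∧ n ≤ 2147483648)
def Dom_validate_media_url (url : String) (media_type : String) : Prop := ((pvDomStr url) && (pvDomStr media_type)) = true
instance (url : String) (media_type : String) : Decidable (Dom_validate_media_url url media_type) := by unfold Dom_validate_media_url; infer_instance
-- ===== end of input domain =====

-- B parses the extension after the last dot (rpartition) and tests set membership,
-- instead of A's per-suffix endswith tests (idiomatic).

-- ===== PORT A =====
def validate_media_url (url : String) (media_type : String) : Bool :=
  let allowed_image_extensions := [".jpg", ".jpeg", ".png", ".gif"]
  let allowed_video_extensions := [".mp4", ".webm"]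
  let allowed_audio_extensions := [".mp3", ".wav"]
  let url_lower := PySem.Str.lower url
  if media_type == "image" then
    allowed_image_extensions.any (fun ext => PySem.Str.endswith url_lower ext)
  else if media_type == "video" then
    allowed_video_extensions.any (fun ext => PySem.Str.endswith url_lower ext)
  else if media_type == "audio" then
    allowed_audio_extensions.any (fun ext => PySem.Str.endswith url_lower ext)
  else
    false

-- ===== PORT B =====
-- module-level table _ALLOWED (frozenset values as distinct-element lists)
def pvAllowed : PySem.Dict String (List String) :=
  PySem.Dict.ofList
    [("image", ["jpg", "jpeg", "png", "gif"]),
     ("video", ["mp4", "webm"]),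
     ("audio", ["mp3", "wav"])]

-- rpartition('.') hand-ported (no PySem primitive): scan the reversed chars,
-- collecting until the first '.' (= last dot of the string); none = separator absent.
-- Exact: returns (reversed) the part after the last '.', iff a '.' occurs.
def pvRPartDot : List Char → Option (List Char)
  | [] => none
  | c :: rest =>
      if c = '.' then some []
      else match pvRPartDot rest with
           | none => none
           | some e => some (c :: e)

def validate_media_url_alt (url : String) (media_type : String) : Bool :=
  match pvRPartDot (PySem.Str.lower url).toList.reverse with
  | none => false                                  -- sep == '' : no dot in url
  | some e => (PySem.Dict.getD pvAllowed media_type []).contains (String.ofList e.reverse)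

-- ===== PRECONDITION & SPEC =====
def Spec_validate_media_url (url : String) (media_type : String) (out : Bool) : Prop := out = validate_media_url_alt url media_type
instance (url : String) (media_type : String) (out : Bool) : Decidable (Spec_validate_media_url url media_type out) := by unfold Spec_validate_media_url; infer_instance

-- ===== CLAIM =====
def Claim_equal_validate_media_url : Prop := ∀ (url : String) (media_type : String), Dom_validate_media_url url media_type → Spec_validate_media_url url media_type (validate_media_url url media_type)

-- ===== LEMMAS AND PROOFS =====

-- key characterisation: pvRPartDot finds u (dot-free) iff u ++ ['.'] is a prefix of rev
theorem pvRPartDot_some_iff (rev : List Char) :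
    ∀ (u : List Char), '.' ∉ u → (pvRPartDot rev = some u ↔ u ++ ['.'] <+: rev) := by
  induction rev with
  | nil =>
    intro u _
    simp only [pvRPartDot]
    constructor
    · intro h; cases h
    · intro h
      have := h.length_le
      simp at this
  | cons c rest ih =>
    intro u hu
    by_cases hc : c = '.'
    · subst hc
      rw [pvRPartDot, if_pos rfl]
      cases u with
      | nil =>
        constructor
        · intro _; exact ⟨rest, rfl⟩
        · intro _; rfl
      | cons d u' =>
        constructor
        · intro h; cases h
        · intro h
          rw [List.cons_append, List.cons_prefix_cons] at h
          exact absurd (h.1 ▸ List.mem_cons_self) hu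
    · rw [pvRPartDot, if_neg hc]
      cases hp : pvRPartDot rest with
      | none =>
        constructor
        · intro h; cases h
        · intro h
          exfalso
          cases u with
          | nil =>
            simp only [List.nil_append, List.cons_prefix_cons] at h
            exact hc h.1.symm
          | cons d u' =>
            rw [List.cons_append, List.cons_prefix_cons] at h
            have hu' : '.' ∉ u' := fun hh => hu (List.mem_cons_of_mem _ hh)
            have := (ih u' hu').mpr h.2
            rw [hp] at this; cases this
      | some e =>
        cases u with
        | nil =>
          constructor
          · intro h; simp at h
          · intro h
            simp only [List.nil_append, List.cons_prefix_cons] at h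
            exact absurd h.1.symm hc
        | cons d u' =>
          have hu' : '.' ∉ u' := fun hh => hu (List.mem_cons_of_mem _ hh)
          rw [List.cons_append, List.cons_prefix_cons, ← ih u' hu', hp]
          constructor
          · intro h
            simp only [Option.some.injEq, List.cons.injEq] at h
            exact ⟨h.1.symm, by rw [h.2]⟩
          · intro ⟨h1, h2⟩
            simp only [Option.some.injEq] at h2
            rw [h1, h2]

-- endswith ('.'::w) for dot-free w, phrased through pvRPartDot on the reversed chars
theorem ends_iff_rpart (ul : List Char) (w : String) (hw : '.' ∉ w.toList) :
    (PySem.Chars.endswith ul ('.' :: w.toList) = true) ↔ pvRPartDot ul.reverse = some w.toList.reverse := by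
  rw [PySem.Chars.endswith_iff,
      pvRPartDot_some_iff ul.reverse w.toList.reverse (by simpa using hw),
      ← List.reverse_suffix]
  simp

-- one media-type branch: A's any-of-endswith tests equal B's parse-then-member test
theorem case_eq (ul : List Char) (ws : List String)
    (hws : ∀ w ∈ ws, '.' ∉ w.toList) :
    (ws.any (fun w => PySem.Chars.endswith ul ('.' :: w.toList)))
      = (match pvRPartDot ul.reverse with
         | none => false
         | some e => ws.contains (String.ofList e.reverse)) := by
  cases hp : pvRPartDot ul.reverse with
  | none =>
    rw [List.any_eq_false]
    intro w hw
    rw [Bool.not_eq_true]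
    rw [← Bool.not_eq_true, ends_iff_rpart ul w (hws w hw), hp]
    simp
  | some e =>
    rw [Bool.eq_iff_iff, List.any_eq_true, List.contains_iff_exists_mem_beq]
    constructor
    · rintro ⟨w, hw, hend⟩
      rw [ends_iff_rpart ul w (hws w hw), hp, Option.some.injEq] at hend
      refine ⟨w, hw, ?_⟩
      rw [hend]
      simp
    · rintro ⟨w, hw, hbeq⟩
      have hweq : String.ofList e.reverse = w := by simpa using hbeq
      refine ⟨w, hw, ?_⟩
      rw [ends_iff_rpart ul w (hws w hw), hp]
      have hwl : w.toList = e.reverse := by rw [← hweq]; simp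
      rw [hwl]
      simp

-- ===== VERDICT =====
theorem validate_media_url_spec : Claim_equal_validate_media_url := by
  intro url media_type _
  unfold Spec_validate_media_url validate_media_url validate_media_url_alt
  simp only [PySem.Str.endswith]
  by_cases h1 : media_type = "image"
  · subst h1
    rw [if_pos (by decide),
        show PySem.Dict.getD pvAllowed "image" [] = ["jpg", "jpeg", "png", "gif"] from by decide]
    exact case_eq (PySem.Str.lower url).toList ["jpg", "jpeg", "png", "gif"] (by decide)
  · rw [if_neg (by simpa using h1)]
    by_cases h2 : media_type = "video"
    · subst h2
      rw [if_pos (by decide),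
          show PySem.Dict.getD pvAllowed "video" [] = ["mp4", "webm"] from by decide]
      exact case_eq (PySem.Str.lower url).toList ["mp4", "webm"] (by decide)
    · rw [if_neg (by simpa using h2)]
      by_cases h3 : media_type = "audio"
      · subst h3
        rw [if_pos (by decide),
            show PySem.Dict.getD pvAllowed "audio" [] = ["mp3", "wav"] from by decide]
        exact case_eq (PySem.Str.lower url).toList ["mp3", "wav"] (by decide)
      · rw [if_neg (by simpa using h3),
            show PySem.Dict.getD pvAllowed media_type [] = [] from by
              have e1 : ("image" == media_type) = false := by simp [Ne.symm h1]
              have e2 : ("video" == media_type) = false := by simp [Ne.symm h2]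
              have e3 : ("audio" == media_type) = false := by simp [Ne.symm h3]
              simp [pvAllowed, PySem.Dict.getD, PySem.Dict.ofList, PySem.Dict.get?, PySem.Dict.update, PySem.Dict.empty, PySem.Dict.insert, List.find?, e1, e2, e3]]
        cases pvRPartDot (PySem.Str.lower url).toList.reverse <;> rfl
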